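-- pv_equiv track=rewrite | github.com/mbrendler/dotfiles | dot/bin/completer.py | fuzzy_matcher
-- ===== SOURCE A (Python) =====
-- def fuzzy_matcher(entry, string):
--     for character in string:
--         index = entry.find(character)
--         if index >= 0:
--             entry = entry[index:]
--         else:
--             return False
--     return True
-- ===== SOURCE B (Python) =====
-- def fuzzy_matcher(entry, string):
--     # Single left-to-right scan of entry with a cursor into string.
--     # The inner while consumes a run of equal characters of string at the
--     # same entry position (matching the inclusive-restart of the original).
--     j = 0
--     n = len(string)
--     for ch in entry:
--         while j < n and string[j] == ch:
--             j += 1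
--     return j == n
-- ===== Notes on version B (the rewrite author's own statement) =====
-- stated objective: faster
-- what changed: Replaces the repeated entry.find + slice scans (one linear scan of the remaining entry per character of string) by a single left-to-right two-pointer pass over entry with a cursor into string, where an inner while consumes runs of equal characters to preserve the inclusive-restart behaviour.
import Mathlib
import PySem

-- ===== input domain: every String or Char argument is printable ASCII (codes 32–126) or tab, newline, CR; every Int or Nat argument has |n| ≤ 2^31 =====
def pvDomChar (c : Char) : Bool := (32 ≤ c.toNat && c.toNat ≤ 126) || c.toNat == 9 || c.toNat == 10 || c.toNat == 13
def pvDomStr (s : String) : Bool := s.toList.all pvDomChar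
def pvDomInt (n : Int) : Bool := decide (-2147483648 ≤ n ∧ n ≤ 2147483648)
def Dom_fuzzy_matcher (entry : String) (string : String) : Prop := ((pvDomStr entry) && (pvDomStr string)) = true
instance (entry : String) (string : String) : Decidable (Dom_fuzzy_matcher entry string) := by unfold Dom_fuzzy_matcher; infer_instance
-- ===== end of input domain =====

-- B replaces A's repeated find+slice scans by one two-pointer pass (inner while
-- consuming runs of equal characters); measured asymptotically faster.

-- ===== PORT A =====
-- for character in string: index = entry.find(character); if index >= 0: entry = entry[index:] else return False
def pvFuzzA (entry : List Char) (string : List Char) : Bool :=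
  match string with
  | [] => true
  | c :: cs =>
      let index := PySem.Chars.find entry [c]
      if 0 ≤ index then pvFuzzA (PySem.Chars.slice entry (some index) none) cs
      else false

def fuzzy_matcher (entry : String) (string : String) : Bool :=
  pvFuzzA entry.toList string.toList

-- ===== PORT B =====
-- while j < n and string[j] == ch: j += 1
def pvConsume (s : List Char) (ch : Char) (j : Nat) : Nat :=
  if j < s.length ∧ s[j]? = some ch then pvConsume s ch (j + 1) else j
termination_by s.length - j
decreasing_by omega

def fuzzy_matcher_alt (entry : String) (string : String) : Bool :=
  let s := string.toList
  let j := entry.toList.foldl (fun j ch => pvConsume s ch j) 0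
  j == s.length

-- ===== PRECONDITION & SPEC =====
def Spec_fuzzy_matcher (entry : String) (string : String) (out : Bool) : Prop := out = fuzzy_matcher_alt entry string
instance (entry : String) (string : String) (out : Bool) : Decidable (Spec_fuzzy_matcher entry string out) := by unfold Spec_fuzzy_matcher; infer_instance

-- ===== CLAIM (what is proved, stated in full; the proofs are below) =====
def Claim_equal_fuzzy_matcher : Prop := ∀ (entry : String) (string : String), Dom_fuzzy_matcher entry string → Spec_fuzzy_matcher entry string (fuzzy_matcher entry string)

-- ===== LEMMAS AND PROOFS =====

-- common specification: greedy matching with inclusive reuse of the matched position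
def pvGreedy (entry : List Char) (string : List Char) : Bool :=
  match entry, string with
  | _, [] => true
  | [], _ :: _ => false
  | e :: es, c :: cs => if c = e then pvGreedy (e :: es) cs else pvGreedy es (c :: cs)
termination_by entry.length + string.length
decreasing_by all_goals (simp only [List.length_cons]; omega)

theorem pvGreedy_nil (entry : List Char) : pvGreedy entry [] = true := by
  rw [pvGreedy.eq_def]

theorem pvGreedy_nil_left (c : Char) (cs : List Char) : pvGreedy [] (c :: cs) = false := by
  rw [pvGreedy.eq_def]

theorem pvGreedy_cons_eq (e : Char) (es cs : List Char) :
    pvGreedy (e :: es) (e :: cs) = pvGreedy (e :: es) cs := by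
  rw [pvGreedy.eq_def]; simp

theorem pvGreedy_cons_ne (e : Char) (es : List Char) (c : Char) (cs : List Char) (hne : c ≠ e) :
    pvGreedy (e :: es) (c :: cs) = pvGreedy es (c :: cs) := by
  rw [pvGreedy.eq_def]; simp [hne]

theorem pv_singleton_infix_iff (c : Char) (s : List Char) : [c] <:+: s ↔ c ∈ s := by
  constructor
  · intro h; exact h.subset (by simp)
  · intro h
    obtain ⟨t1, t2, rfl⟩ := List.append_of_mem h
    exact ⟨t1, t2, by simp⟩

theorem pv_find_eq_of (s : List Char) (sub : List Char) (k : Nat)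
    (h1 : sub <+: s.drop k) (h2 : ∀ i < k, ¬ sub <+: s.drop i) :
    PySem.Chars.find s sub = (k : Int) := by
  have hin : sub <:+: s := by
    rcases h1 with ⟨t, ht⟩
    refine ⟨s.take k, t, ?_⟩
    rw [List.append_assoc, ht, List.take_append_drop]
  have hnn : 0 ≤ PySem.Chars.find s sub := (PySem.Chars.find_nonneg_iff s sub).2 hin
  obtain ⟨hpre, hmin⟩ := PySem.Chars.find_spec hnn
  rcases lt_trichotomy ((PySem.Chars.find s sub).toNat) k with h | h | h
  · exact absurd hpre (h2 _ h)
  · omega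
  · exact absurd h1 (hmin k h)

theorem pvA_nil (c : Char) (cs : List Char) : pvFuzzA [] (c :: cs) = false := by
  have : PySem.Chars.find [] [c] = -1 := by
    rw [PySem.Chars.find_eq_neg_one_iff]
    intro h
    simp [List.infix_nil] at h
  simp [pvFuzzA, this]

theorem pvA_head (e : Char) (es cs : List Char) :
    pvFuzzA (e :: es) (e :: cs) = pvFuzzA (e :: es) cs := by
  have hf : PySem.Chars.find (e :: es) [e] = (0 : Int) :=
    pv_find_eq_of _ _ 0 (by simp) (by omega)
  simp [pvFuzzA, hf, PySem.Chars.slice_eq_listSlice]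

theorem pvA_skip (e : Char) (es : List Char) (c : Char) (cs : List Char) (hne : c ≠ e) :
    pvFuzzA (e :: es) (c :: cs) = pvFuzzA es (c :: cs) := by
  by_cases hmem : c ∈ es
  · -- find es [c] = k' ≥ 0, find (e::es) [c] = k' + 1
    have hin : [c] <:+: es := (pv_singleton_infix_iff c es).2 hmem
    have hnn : 0 ≤ PySem.Chars.find es [c] := (PySem.Chars.find_nonneg_iff es [c]).2 hin
    set k' := (PySem.Chars.find es [c]).toNat with hk'
    have hkval : PySem.Chars.find es [c] = (k' : Int) := by omega
    obtain ⟨hpre, hmin⟩ := PySem.Chars.find_spec hnn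
    have hf : PySem.Chars.find (e :: es) [c] = ((k' + 1 : Nat) : Int) := by
      apply pv_find_eq_of
      · simpa using hpre
      · intro i hi
        match i with
        | 0 =>
          simp only [List.drop_zero]
          intro h
          exact hne ((List.cons_prefix_cons.1 h).1)
        | j + 1 =>
          simp only [List.drop_succ_cons]
          exact hmin j (by omega)
    have h1 : pvFuzzA (e :: es) (c :: cs) = pvFuzzA (es.drop k') cs := by
      simp only [pvFuzzA, hf, PySem.Chars.slice_eq_listSlice]
      rw [PySem.List.slice_from_natCast (e :: es) (k' + 1)]
      rw [if_pos (by positivity : (0 : ℤ) ≤ ((k' + 1 : ℕ) : ℤ))]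
      rw [List.drop_succ_cons]
    have h2 : pvFuzzA es (c :: cs) = pvFuzzA (es.drop k') cs := by
      simp only [pvFuzzA, hkval, PySem.Chars.slice_eq_listSlice]
      rw [PySem.List.slice_from_natCast]
      simp
    rw [h1, h2]
  · -- c not in es (and c ≠ e): both return false
    have h1 : PySem.Chars.find (e :: es) [c] = -1 := by
      rw [PySem.Chars.find_eq_neg_one_iff]
      intro h
      rcases List.mem_cons.1 ((pv_singleton_infix_iff c (e :: es)).1 h) with h | h
      · exact hne h
      · exact hmem h
    have h2 : PySem.Chars.find es [c] = -1 := by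
      rw [PySem.Chars.find_eq_neg_one_iff]
      intro h
      exact hmem ((pv_singleton_infix_iff c es).1 h)
    simp [pvFuzzA, h1, h2]

-- A equals the greedy specification
theorem pvA_eq_greedy (entry string : List Char) : pvFuzzA entry string = pvGreedy entry string := by
  fun_induction pvGreedy entry string with
  | case1 e => cases e <;> rfl
  | case2 c cs => exact pvA_nil c cs
  | case3 es c cs ih =>
      rw [pvA_head, ih]
  | case4 e es c cs hne ih =>
      rw [pvA_skip e es c cs hne, ih]

theorem pvConsume_le (s : List Char) (ch : Char) (j : Nat) (h : j ≤ s.length) :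
    j ≤ pvConsume s ch j ∧ pvConsume s ch j ≤ s.length := by
  fun_induction pvConsume s ch j with
  | case1 j hc ih =>
      have := ih (by omega)
      omega
  | case2 j hc => omega

-- one step of B (the inner while) matches one entry-step of the greedy spec
theorem pvConsume_greedy (s : List Char) (e : Char) (es : List Char) (j : Nat) (h : j ≤ s.length) :
    pvGreedy (e :: es) (s.drop j) = pvGreedy es (s.drop (pvConsume s e j)) := by
  fun_induction pvConsume s e j with
  | case1 j hc ih =>
      obtain ⟨hj, hch⟩ := hc
      have hdrop : s.drop j = e :: s.drop (j + 1) := by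
        rw [List.drop_eq_getElem_cons hj]
        have : s[j] = e := by
          have h' := List.getElem?_eq_getElem hj
          rw [h'] at hch
          exact Option.some.inj hch
        rw [this]
      rw [hdrop, ← ih (by omega)]
      exact pvGreedy_cons_eq e es _
  | case2 j hc =>
      by_cases hj : j < s.length
      · have hne : ¬ (s[j]? = some e) := fun h' => hc ⟨hj, h'⟩
        have hdrop : s.drop j = s[j] :: s.drop (j + 1) := List.drop_eq_getElem_cons hj
        have hne' : ¬ (s[j] = e) := by
          intro he
          exact hne (by rw [List.getElem?_eq_getElem hj, he])
        rw [hdrop, pvGreedy_cons_ne e es _ _ hne']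
      · have : j = s.length := by omega
        subst this
        simp [pvGreedy_nil]

theorem pvB_eq_greedy (entry s : List Char) (j : Nat) (h : j ≤ s.length) :
    ((entry.foldl (fun j ch => pvConsume s ch j) j) == s.length) = pvGreedy entry (s.drop j) := by
  induction entry generalizing j with
  | nil =>
      simp only [List.foldl_nil]
      rcases Nat.lt_or_ge j s.length with hj | hj
      · rw [List.drop_eq_getElem_cons hj, pvGreedy_nil_left]
        have hne : ¬ (j = s.length) := by omega
        simp [hne]
      · have : j = s.length := by omega
        subst this
        simp [pvGreedy_nil]
  | cons e es ih =>
      simp only [List.foldl_cons]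
      have hle := pvConsume_le s e j h
      rw [ih _ hle.2, ← pvConsume_greedy s e es j h]

-- ===== VERDICT (by name: the statement is the Claim_ definition above) =====
theorem fuzzy_matcher_spec : Claim_equal_fuzzy_matcher := by
  intro entry string _
  unfold Spec_fuzzy_matcher fuzzy_matcher fuzzy_matcher_alt
  rw [pvA_eq_greedy]
  have := pvB_eq_greedy entry.toList string.toList 0 (Nat.zero_le _)
  simpa using this.symm
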